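-- pv_equiv track=rewrite | github.com/metalwhale/crystal | crystal-ai/crystal/train.py | _count_word_jp
-- ===== SOURCE A (Python) =====
-- def _count_word_jp(word: str) -> int:
--     """
--     Count the number of syllables in a Japanese word.
--     """
--     # Combinations of CVC, CV and V are syllables
--     if word == "":
--         return 0
--     word = word.lower()
--     count = 0
--     vowels = "aeiouy"
--     if word[0] in vowels:
--         count += 1
--     for index in range(1, len(word)):
--         if word[index] in vowels and word[index - 1] not in vowels:
--             count += 1
--         elif word[index] in vowels and word[index - 1] in vowels and word[index] != word[index - 1]:
--             count += 1
--     if count == 0: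
--         count += 1
--     return count
-- ===== SOURCE B (Python) =====
-- def _count_word_jp(word: str) -> int:
--     """
--     Count the number of syllables in a Japanese word.
--
--     One syllable per maximal run of identical vowel characters.
--     """
--     if word == "":
--         return 0
--     w = word.lower()
--     # collapse consecutive duplicate characters, then count the vowels left
--     runs = [w[0]] + [c for p, c in zip(w, w[1:]) if c != p]
--     count = sum(c in "aeiouy" for c in runs)
--     return count if count else 1
-- ===== Notes on version B (the rewrite author's own statement) =====
-- stated objective: idiomatic
-- what changed: Replaces the index loop with explicit prev-index comparisons by collapsing consecutive duplicate characters in one comprehension and counting the vowels among the collapsed runs.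
import Mathlib
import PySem

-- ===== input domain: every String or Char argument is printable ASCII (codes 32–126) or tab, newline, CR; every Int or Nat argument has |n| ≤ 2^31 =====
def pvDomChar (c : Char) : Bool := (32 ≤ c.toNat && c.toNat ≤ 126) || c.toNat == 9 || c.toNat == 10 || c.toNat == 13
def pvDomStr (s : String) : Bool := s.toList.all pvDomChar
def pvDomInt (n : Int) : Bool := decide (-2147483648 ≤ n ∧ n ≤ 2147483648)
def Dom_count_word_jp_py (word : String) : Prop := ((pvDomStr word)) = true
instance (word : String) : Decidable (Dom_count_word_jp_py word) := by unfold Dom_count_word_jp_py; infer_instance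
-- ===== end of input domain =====

-- B collapses consecutive duplicate characters once and counts the vowels among the runs,
-- instead of A's index loop comparing word[index] with word[index-1]; objective: idiomatic.

def pvVowels : List Char := "aeiouy".toList

-- ===== PORT A =====
-- A's loop body; pyGetD with default ' ' is exact here: every index the loop visits is in range.
def pvBodyA (cs : List Char) (count : Int) (index : Int) : Int :=
  if PySem.List.pyGetD cs index ' ' ∈ pvVowels ∧ PySem.List.pyGetD cs (index - 1) ' ' ∉ pvVowels then
    count + 1
  else if PySem.List.pyGetD cs index ' ' ∈ pvVowels ∧ PySem.List.pyGetD cs (index - 1) ' ' ∈ pvVowels ∧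
      PySem.List.pyGetD cs index ' ' ≠ PySem.List.pyGetD cs (index - 1) ' ' then
    count + 1
  else count

def count_word_jp_py (word : String) : Int :=
  if word = "" then 0
  else
    let cs := (PySem.Str.lower word).toList
    let count : Int := if PySem.List.pyGetD cs 0 ' ' ∈ pvVowels then 1 else 0
    let count := (PySem.List.pyRange 1 (cs.length : Int) 1).foldl (pvBodyA cs) count
    if count = 0 then count + 1 else count

-- ===== PORT B =====
def count_word_jp_py_alt (word : String) : Int :=
  if word = "" then 0
  else
    match (PySem.Str.lower word).toList with
    | [] => 0  -- unreachable: word ≠ "" and lower preserves length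
    | c :: rest =>
      let w := c :: rest
      let runs := c :: ((w.zip rest).filter (fun pc => pc.2 ≠ pc.1)).map Prod.snd
      let count : Int := (runs.countP (fun ch => decide (ch ∈ pvVowels)) : Nat)
      if count = 0 then 1 else count

-- ===== PRECONDITION & SPEC =====
def Spec_count_word_jp_py (word : String) (out : Int) : Prop := out = count_word_jp_py_alt word
instance (word : String) (out : Int) : Decidable (Spec_count_word_jp_py word out) := by unfold Spec_count_word_jp_py; infer_instance

-- ===== CLAIM (what is proved, stated in full; the proofs are below) =====
def Claim_equal_count_word_jp_py : Prop := ∀ (word : String), Dom_count_word_jp_py word → Spec_count_word_jp_py word (count_word_jp_py word)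

-- ===== LEMMAS AND PROOFS =====

-- proof-side recursion: A's loop as a walk over (previous char, remaining suffix)
def pvFold2 (p : Char) (suf : List Char) (acc : Int) : Int :=
  match suf with
  | [] => acc
  | c :: t => pvFold2 c t (if c ∈ pvVowels ∧ c ≠ p then acc + 1 else acc)

lemma pvBodyA_eq (cs : List Char) (acc : Int) (k : Nat) (hk : 0 < k) (hlt : k < cs.length) :
    pvBodyA cs acc (k : Int) =
      (if cs[k] ∈ pvVowels ∧ cs[k] ≠ cs[k-1] then acc + 1 else acc) := by
  have h1 : PySem.List.pyGetD cs (k : Int) ' ' = cs[k] := by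
    rw [PySem.List.pyGetD_eq_getElem] <;> simp <;> omega
  have h2 : PySem.List.pyGetD cs ((k : Int) - 1) ' ' = cs[k-1] := by
    have : ((k : Int) - 1).toNat = k - 1 := by omega
    rw [PySem.List.pyGetD_eq_getElem] <;> simp [this] <;> omega
  unfold pvBodyA
  rw [h1, h2]
  by_cases hv : cs[k] ∈ pvVowels <;> by_cases hp : cs[k-1] ∈ pvVowels <;>
    by_cases he : cs[k] = cs[k-1] <;> simp_all

lemma pvLoopA (cs : List Char) (k : Nat) (acc : Int) (hk : 0 < k) (hle : k ≤ cs.length) :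
    (PySem.List.pyRange (k : Int) (cs.length : Int) 1).foldl (pvBodyA cs) acc
      = pvFold2 (cs[k-1]'(by omega)) (cs.drop k) acc := by
  by_cases h : k = cs.length
  · subst h
    rw [PySem.List.pyRange_one_eq_nil (by omega)]
    simp [pvFold2]
  · have hlt : k < cs.length := by omega
    rw [PySem.List.pyRange_one_cons (by exact_mod_cast hlt)]
    have : ((k : Int) + 1) = ((k + 1 : Nat) : Int) := by push_cast; ring
    rw [List.foldl_cons, this, pvLoopA cs (k + 1) _ (by omega) (by omega)]
    rw [pvBodyA_eq cs acc k hk hlt]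
    have hdrop : cs.drop k = cs[k] :: cs.drop (k + 1) := List.drop_eq_getElem_cons hlt
    rw [hdrop]
    simp [pvFold2]
termination_by cs.length - k

lemma pvFold2_count (suf : List Char) : ∀ (p : Char) (acc : Int),
    pvFold2 p suf acc
      = acc + (((p :: suf).zip suf).countP (fun pc => decide (pc.2 ∈ pvVowels ∧ pc.2 ≠ pc.1)) : Nat) := by
  induction suf with
  | nil => intro p acc; simp [pvFold2]
  | cons c t ih =>
    intro p acc
    simp only [pvFold2, List.zip_cons_cons, List.countP_cons, ih c]
    by_cases h : c ∈ pvVowels ∧ c ≠ p <;> simp [h] <;> push_cast <;> ring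

-- B's run count, re-expressed over the same zipped pairs
lemma pvCount_map_filter (z : List (Char × Char)) :
    ((z.filter (fun pc => pc.2 ≠ pc.1)).map Prod.snd).countP (fun ch => decide (ch ∈ pvVowels))
      = z.countP (fun pc => decide (pc.2 ∈ pvVowels ∧ pc.2 ≠ pc.1)) := by
  rw [List.countP_map, List.countP_filter]
  apply List.countP_congr
  intro pc _
  simp [Function.comp]

lemma pvRuns_count (c : Char) (rest : List Char) :
    (((c :: ((((c :: rest).zip rest).filter (fun pc => pc.2 ≠ pc.1)).map Prod.snd)).countP
        (fun ch => decide (ch ∈ pvVowels))) : Int)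
      = (if c ∈ pvVowels then (1 : Int) else 0)
        + (((c :: rest).zip rest).countP (fun pc => decide (pc.2 ∈ pvVowels ∧ pc.2 ≠ pc.1)) : Nat) := by
  rw [List.countP_cons, pvCount_map_filter]
  by_cases h : c ∈ pvVowels <;> simp [h] <;> push_cast <;> ring

lemma pv_main (word : String) : count_word_jp_py word = count_word_jp_py_alt word := by
  unfold count_word_jp_py count_word_jp_py_alt
  by_cases hw : word = ""
  · simp [hw]
  · simp only [hw, if_false]
    cases hcs : (PySem.Str.lower word).toList with
    | nil =>
      exfalso
      apply hw
      have hl : word.toList = [] := by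
        have h := hcs
        rw [PySem.Str.toList_lower] at h
        exact List.map_eq_nil_iff.mp h
      simpa using hl
    | cons c rest =>
      simp only [hcs]
      have h0 : PySem.List.pyGetD (c :: rest) 0 ' ' = c := PySem.List.pyGetD_zero_cons c rest ' '
      have hloop := pvLoopA (c :: rest) 1 (if c ∈ pvVowels then (1:Int) else 0) (by omega) (by simp)
      norm_num [List.drop_one] at hloop
      rw [h0]
      simp only [List.length_cons]
      push_cast
      rw [hloop, pvFold2_count, pvRuns_count]
      by_cases h : c ∈ pvVowels <;>
        simp only [h, if_true, if_false] <;> split_ifs <;> omega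

-- ===== VERDICT (by name: the statement is the Claim_ definition above) =====
theorem count_word_jp_py_spec : Claim_equal_count_word_jp_py := by
  intro word _
  unfold Spec_count_word_jp_py
  exact pv_main word
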